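-- pv_equiv track=rewrite | github.com/VT-ICAM/ArgyrisPack | ap/mesh/meshtools.py | organize_edges
-- ===== SOURCE A (Python) =====
-- def organize_edges(edges, borders=None, default_border='land'):
--     """
--     Organize edges in to various collections specified by borders.
--
--     Required Arguments
--     ------------------
--     * edges          : List of edges of the form
--
--         (node_number, node_number, ... , edge_type)
--
--                        The sorting process requires edge_type to be the last
--                        entry in each tuple.
--
--     Optional Arguments
--     ------------------
--     * borders        : a dictionary correlating border numbers with names. For
--                        example,
--
--           borders = {'ocean_in' : 1, 'ocean_out' : 2}
--
--     * default_border : the border to place all other edges in. Defaults to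
--                       'land'.
--     """
--     if borders is None:
--         borders = dict()
--     if default_border in borders:
--         raise ValueError("Specific border and default border share same name")
--
--     edge_collections = dict()
--     edge_collections[default_border] = set(edges)
--     for border, labels in borders.items():
--         edge_collections[border] = {t for t in edge_collections[default_border]
--                                     if t[-1] in labels}
--         edge_collections[default_border] -= edge_collections[border]
--     return edge_collections
-- ===== SOURCE B (Python) =====
-- def organize_edges(edges, borders=None, default_border='land'):
--     """One pass over the edges: assign each edge to the first border whose
--     labels contain its type, else to the default border."""
--     if borders is None:
--         borders = dict()
--     if default_border in borders:
--         raise ValueError("Specific border and default border share same name")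
--
--     collections = {default_border: set()}
--     for border in borders:
--         collections[border] = set()
--     for t in edges:
--         target = default_border
--         for border, labels in borders.items():
--             if t[-1] in labels:
--                 target = border
--                 break
--         collections[target].add(t)
--     return collections
-- ===== Notes on version B (the rewrite author's own statement) =====
-- stated objective: alternative
-- what changed: A repeatedly filters the shrinking default set and subtracts a new set per border; B makes a single pass over the edges, assigning each edge to the first border whose labels contain its type (first-border-wins), into pre-created empty collections.
import Mathlib
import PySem

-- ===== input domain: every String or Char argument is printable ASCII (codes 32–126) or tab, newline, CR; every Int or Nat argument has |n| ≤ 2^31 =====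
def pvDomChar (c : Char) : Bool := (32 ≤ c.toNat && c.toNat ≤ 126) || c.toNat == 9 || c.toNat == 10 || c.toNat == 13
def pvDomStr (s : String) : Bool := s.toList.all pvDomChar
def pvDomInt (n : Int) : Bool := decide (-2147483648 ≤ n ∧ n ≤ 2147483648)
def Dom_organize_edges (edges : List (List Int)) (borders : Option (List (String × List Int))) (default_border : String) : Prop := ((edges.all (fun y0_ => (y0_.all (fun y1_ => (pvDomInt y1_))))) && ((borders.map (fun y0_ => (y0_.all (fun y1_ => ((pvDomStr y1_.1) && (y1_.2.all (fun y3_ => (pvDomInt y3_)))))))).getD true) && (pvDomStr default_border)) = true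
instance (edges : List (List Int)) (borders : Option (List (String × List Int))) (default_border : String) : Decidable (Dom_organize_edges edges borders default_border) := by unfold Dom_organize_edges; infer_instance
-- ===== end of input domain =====

-- ===== PORT A =====
-- B replaces A's per-border filter-and-subtract passes over the default set with a single pass
-- assigning each edge to its first matching border (alternative decomposition; no speed claim).
-- A-side helper: 't[-1] in labels' (none = IndexError, excluded by Pre_ whenever it is reached)
def edgeMatch (t : List Int) (labels : List Int) : Bool :=
  match PySem.List.pyGet? t (-1) with
  | some x => labels.contains x
  | none => false

def organize_edges (edges : List (List Int)) (borders : Option (List (String × List Int))) (default_border : String) : List (String × List (List Int)) :=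
  -- 'if borders is None: borders = dict()'
  let bs := match borders with | none => [] | some bs => bs
  -- 'if default_border in borders: raise ValueError(...)' — such inputs are excluded by Pre_; the port continues
  let d : PySem.Dict String (PySem.Set (List Int)) :=
    PySem.Dict.empty.insert default_border (PySem.Set.ofList edges)
  let d := bs.foldl (fun d p =>
    let S : PySem.Set (List Int) := d.getD default_border []
    let C : PySem.Set (List Int) := PySem.Set.ofList (S.filter (fun t => edgeMatch t p.2))
    let d := d.insert p.1 C
    d.insert default_border (PySem.Set.diff S C)) d
  d.items

-- ===== PORT B =====
-- B-side helper: the inner 'for border, labels in borders.items(): if t[-1] in labels: break' loop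
def firstTarget (bs : List (String × List Int)) (t : List Int) (dflt : String) : String :=
  match bs with
  | [] => dflt
  | p :: rest =>
    match PySem.List.pyGet? t (-1) with
    | none => dflt  -- IndexError in Python; excluded by Pre_ whenever this point is reached
    | some x => if p.2.contains x then p.1 else firstTarget rest t dflt

def organize_edges_alt (edges : List (List Int)) (borders : Option (List (String × List Int))) (default_border : String) : List (String × List (List Int)) :=
  let bs := match borders with | none => [] | some bs => bs
  let d : PySem.Dict String (PySem.Set (List Int)) :=
    PySem.Dict.empty.insert default_border PySem.Set.empty
  let d := bs.foldl (fun d p => d.insert p.1 PySem.Set.empty) d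
  let d := edges.foldl (fun d t =>
    d.modify (firstTarget bs t default_border) [] (fun s => PySem.Set.add s t)) d
  d.items

-- ===== PRECONDITION & SPEC =====
-- Pre_ excludes exactly: (a) default_border being a key of borders (A raises ValueError), (b) an empty edge
-- together with a nonempty borders dict (A raises IndexError), and (c) borders association lists with
-- duplicate keys — a Python dict never presents duplicate keys, so (c) excludes no realizable Python input.
def Pre_organize_edges (edges : List (List Int)) (borders : Option (List (String × List Int))) (default_border : String) : Prop :=
  default_border ∉ (borders.getD []).map Prod.fst ∧ ((borders.getD []).map Prod.fst).Nodup ∧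
    (borders.getD [] ≠ [] → ∀ t ∈ edges, t ≠ [])
instance (edges : List (List Int)) (borders : Option (List (String × List Int))) (default_border : String) : Decidable (Pre_organize_edges edges borders default_border) := by unfold Pre_organize_edges; infer_instance

def pvWitness_organize_edges : List (List Int) × (Option (List (String × List Int))) × String :=
  ([[1, 2, 1], [3, 4, 2], [5, 6, 3]], some [("ocean", [1, 2])], "land")

def Spec_organize_edges (edges : List (List Int)) (borders : Option (List (String × List Int))) (default_border : String) (out : List (String × List (List Int))) : Prop := out = organize_edges_alt edges borders default_border
instance (edges : List (List Int)) (borders : Option (List (String × List Int))) (default_border : String) (out : List (String × List (List Int))) : Decidable (Spec_organize_edges edges borders default_border out) := by unfold Spec_organize_edges; infer_instance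

-- ===== CLAIM (what is proved, stated in full; the proofs are below) =====
def Claim_equal_organize_edges : Prop := ∀ (edges : List (List Int)) (borders : Option (List (String × List Int))) (default_border : String), Dom_organize_edges edges borders default_border → Pre_organize_edges edges borders default_border → Spec_organize_edges edges borders default_border (organize_edges edges borders default_border)

-- ===== LEMMAS AND PROOFS =====

-- A's loop body as a named function (definitionally equal to the lambda in the port)
def stepA (dflt : String) (d : PySem.Dict String (PySem.Set (List Int))) (p : String × List Int) :
    PySem.Dict String (PySem.Set (List Int)) :=
  let S : PySem.Set (List Int) := d.getD dflt []
  let C : PySem.Set (List Int) := PySem.Set.ofList (S.filter (fun t => edgeMatch t p.2))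
  let d := d.insert p.1 C
  d.insert dflt (PySem.Set.diff S C)

-- reduction lemmas for firstTarget / edgeMatch
theorem firstTarget_cons_none (p : String × List Int) (rest : List (String × List Int))
    (t : List Int) (dflt : String) (hg : PySem.List.pyGet? t (-1) = none) :
    firstTarget (p :: rest) t dflt = dflt := by
  unfold firstTarget; rw [hg]

theorem firstTarget_cons_some (p : String × List Int) (rest : List (String × List Int))
    (t : List Int) (dflt : String) (x : Int) (hg : PySem.List.pyGet? t (-1) = some x) :
    firstTarget (p :: rest) t dflt = if p.2.contains x then p.1 else firstTarget rest t dflt := by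
  rw [show firstTarget (p :: rest) t dflt = (match PySem.List.pyGet? t (-1) with
      | none => dflt
      | some y => if p.2.contains y then p.1 else firstTarget rest t dflt) from rfl, hg]

theorem edgeMatch_none (t : List Int) (labels : List Int) (hg : PySem.List.pyGet? t (-1) = none) :
    edgeMatch t labels = false := by
  unfold edgeMatch; rw [hg]

theorem edgeMatch_some (t : List Int) (labels : List Int) (x : Int)
    (hg : PySem.List.pyGet? t (-1) = some x) : edgeMatch t labels = labels.contains x := by
  unfold edgeMatch; rw [hg]

-- first-occurrence dedup commutes with filter
theorem pv_dedup_filter (q : List Int → Bool) (l : List (List Int)) :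
    PySem.Set.ofList (l.filter q) = (PySem.Set.ofList l).filter q := by
  induction l using List.reverseRecOn with
  | nil => simp
  | append_singleton xs x ih =>
    rw [List.filter_append, PySem.Set.ofList_append_singleton]
    by_cases hq : q x = true
    · have hfx : List.filter q [x] = [x] := by simp [hq]
      rw [hfx, PySem.Set.ofList_append_singleton, ih]
      by_cases hx : x ∈ PySem.Set.ofList xs
      · rw [PySem.Set.add_of_mem hx,
          PySem.Set.add_of_mem (by simp [List.mem_filter, hx, hq])]
      · rw [PySem.Set.add_of_not_mem hx,
          PySem.Set.add_of_not_mem (fun h => hx (List.mem_of_mem_filter h)),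
          List.filter_append, hfx]
    · have hfx : List.filter q [x] = [] := by simp [hq]
      rw [hfx, List.append_nil, ih]
      by_cases hx : x ∈ PySem.Set.ofList xs
      · rw [PySem.Set.add_of_mem hx]
      · rw [PySem.Set.add_of_not_mem hx, List.filter_append, hfx, List.append_nil]

theorem pv_diff_filter (S : List (List Int)) (q : List Int → Bool) :
    PySem.Set.diff S (S.filter q) = S.filter (fun x => !q x) := by
  show S.filter _ = _
  apply List.filter_congr
  intro x hx
  simp [List.mem_filter, hx]

-- where firstTarget can land
theorem firstTarget_mem (bs : List (String × List Int)) (t : List Int) (dflt : String) :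
    firstTarget bs t dflt = dflt ∨ firstTarget bs t dflt ∈ bs.map Prod.fst := by
  induction bs with
  | nil => exact Or.inl rfl
  | cons p rest ih =>
    cases hg : PySem.List.pyGet? t (-1) with
    | none => exact Or.inl (firstTarget_cons_none p rest t dflt hg)
    | some x =>
      rw [firstTarget_cons_some p rest t dflt x hg]
      by_cases hc : p.2.contains x = true
      · rw [if_pos hc]
        exact Or.inr (by rw [List.map_cons]; exact List.mem_cons_self)
      · rw [if_neg hc]
        rcases ih with h | h
        · exact Or.inl h
        · exact Or.inr (by rw [List.map_cons]; exact List.mem_cons_of_mem _ h)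

theorem firstTarget_none (bs : List (String × List Int)) (t : List Int) (dflt : String)
    (hg : PySem.List.pyGet? t (-1) = none) : firstTarget bs t dflt = dflt := by
  cases bs with
  | nil => rfl
  | cons p rest => exact firstTarget_cons_none p rest t dflt hg

-- one step of firstTarget, seen from a key other than the head border's name
theorem ft_cons (p : String × List Int) (rest : List (String × List Int)) (t : List Int)
    (dflt k : String) (h : p.1 ≠ k) :
    (firstTarget (p :: rest) t dflt == k) = (!edgeMatch t p.2 && (firstTarget rest t dflt == k)) := by
  cases hg : PySem.List.pyGet? t (-1) with
  | none =>
    rw [firstTarget_cons_none p rest t dflt hg, edgeMatch_none t p.2 hg,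
      firstTarget_none rest t dflt hg]
    simp
  | some x =>
    rw [firstTarget_cons_some p rest t dflt x hg, edgeMatch_some t p.2 x hg]
    by_cases hc : p.2.contains x = true
    · rw [if_pos hc, hc]
      simp [h]
    · rw [if_neg hc, Bool.eq_false_iff.mpr hc]
      simp

-- firstTarget at the head border's name
theorem ft_cons_self (p : String × List Int) (rest : List (String × List Int)) (t : List Int)
    (dflt : String) (h1 : dflt ≠ p.1) (h2 : p.1 ∉ rest.map Prod.fst) :
    (firstTarget (p :: rest) t dflt == p.1) = edgeMatch t p.2 := by
  cases hg : PySem.List.pyGet? t (-1) with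
  | none =>
    rw [firstTarget_cons_none p rest t dflt hg, edgeMatch_none t p.2 hg]
    simp [beq_eq_false_iff_ne, h1]
  | some x =>
    rw [firstTarget_cons_some p rest t dflt x hg, edgeMatch_some t p.2 x hg]
    by_cases hc : p.2.contains x = true
    · rw [if_pos hc, hc]; simp
    · rw [if_neg hc, Bool.eq_false_iff.mpr hc]
      rcases firstTarget_mem rest t dflt with hm | hm
      · simp [beq_eq_false_iff_ne, hm, h1]
      · simp [beq_eq_false_iff_ne, show firstTarget rest t dflt ≠ p.1 from fun e => h2 (e ▸ hm)]

-- B's edge loop, per key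
theorem B_fold_getD (bs : List (String × List Int)) (dflt : String)
    (edges : List (List Int)) (d : PySem.Dict String (PySem.Set (List Int))) (k : String) :
    (edges.foldl (fun d t => d.modify (firstTarget bs t dflt) [] (fun s => PySem.Set.add s t)) d).getD k [] =
      (edges.filter (fun t => firstTarget bs t dflt == k)).foldl (fun s t => PySem.Set.add s t) (d.getD k []) := by
  induction edges generalizing d with
  | nil => rfl
  | cons t rest ih =>
    simp only [List.foldl_cons, List.filter_cons, ih]
    by_cases hk : firstTarget bs t dflt = k
    · rw [hk, PySem.Dict.getD_modify, if_pos rfl]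
      simp
    · rw [PySem.Dict.getD_modify, if_neg (Ne.symm hk)]
      simp [hk]

-- A's border loop, per key
theorem A_fold_getD (bs : List (String × List Int)) (dflt : String) :
    ∀ (d : PySem.Dict String (PySem.Set (List Int))),
    dflt ∉ bs.map Prod.fst → (bs.map Prod.fst).Nodup → (d.getD dflt []).Nodup →
    ∀ k, (bs.foldl (stepA dflt) d).getD k [] =
      if k = dflt ∨ k ∈ bs.map Prod.fst
      then (d.getD dflt []).filter (fun t => firstTarget bs t dflt == k)
      else d.getD k [] := by
  induction bs with
  | nil =>
    intro d _ _ _ k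
    by_cases hk : k = dflt
    · subst hk
      simp [firstTarget]
    · simp [hk]
  | cons p rest ih =>
    intro d hd hn hS k
    rw [List.map_cons] at hd hn
    have hd1 : dflt ≠ p.1 := fun e => hd (e ▸ List.mem_cons_self)
    have hd2 : dflt ∉ rest.map Prod.fst := fun h => hd (List.mem_cons_of_mem _ h)
    have hn1 : p.1 ∉ rest.map Prod.fst := (List.nodup_cons.mp hn).1
    have hn2 : (rest.map Prod.fst).Nodup := (List.nodup_cons.mp hn).2
    set S : PySem.Set (List Int) := d.getD dflt [] with hSdef
    have hC : PySem.Set.ofList (S.filter (fun t => edgeMatch t p.2)) = S.filter (fun t => edgeMatch t p.2) :=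
      PySem.Set.ofList_eq_self_of_nodup _ (hS.filter _)
    have e1 : (stepA dflt d p).getD dflt [] = S.filter (fun t => !edgeMatch t p.2) := by
      unfold stepA
      rw [PySem.Dict.getD_insert_self, ← hSdef, hC, pv_diff_filter]
    have e2 : (stepA dflt d p).getD p.1 [] = S.filter (fun t => edgeMatch t p.2) := by
      unfold stepA
      rw [PySem.Dict.getD_insert, if_neg hd1.symm, PySem.Dict.getD_insert_self, ← hSdef, hC]
    have e3 : ∀ k', k' ≠ dflt → k' ≠ p.1 → (stepA dflt d p).getD k' [] = d.getD k' [] := by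
      intro k' h1 h2
      unfold stepA
      rw [PySem.Dict.getD_insert, if_neg h1, PySem.Dict.getD_insert, if_neg h2]
    have hS' : ((stepA dflt d p).getD dflt []).Nodup := by rw [e1]; exact hS.filter _
    rw [List.foldl_cons]
    have H := ih (stepA dflt d p) hd2 hn2 hS'
    by_cases hk2 : k = p.1
    · subst hk2
      rw [H p.1, if_neg (fun h => h.elim (fun e => hd1 e.symm) hn1), e2,
        if_pos (Or.inr (by rw [List.map_cons]; exact List.mem_cons_self))]
      exact (List.filter_congr (fun t _ => by rw [ft_cons_self p rest t dflt hd1 hn1])).symm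
    · by_cases hkr : k = dflt ∨ k ∈ rest.map Prod.fst
      · rw [H k, if_pos hkr, e1, List.filter_filter,
          if_pos (hkr.elim Or.inl (fun hm => Or.inr (by rw [List.map_cons]; exact List.mem_cons_of_mem _ hm)))]
        exact (List.filter_congr (fun t _ => by rw [ft_cons p rest t dflt k (fun e => hk2 e.symm), Bool.and_comm])).symm
      · rw [H k, if_neg hkr, e3 k (fun h => hkr (Or.inl h)) hk2,
          if_neg (fun h => h.elim (fun e => hkr (Or.inl e)) (fun hm =>
            (List.mem_cons.mp (by rwa [List.map_cons] at hm)).elim hk2 (fun e => hkr (Or.inr e))))]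

-- A's border loop, keys
theorem A_fold_keys (bs : List (String × List Int)) (dflt : String) :
    ∀ (d : PySem.Dict String (PySem.Set (List Int))), dflt ∈ d.keys →
    (bs.foldl (stepA dflt) d).keys = PySem.Set.update d.keys (bs.map Prod.fst) := by
  induction bs with
  | nil => intro d _; rw [List.map_nil, PySem.Set.update_nil]; rfl
  | cons p rest ih =>
    intro d hdflt
    have h1 : (d.insert p.1 (PySem.Set.ofList ((d.getD dflt []).filter (fun t => edgeMatch t p.2)))).keys
        = PySem.Set.add d.keys p.1 := by
      by_cases hc : d.contains p.1 = true
      · rw [PySem.Dict.keys_insert_of_contains _ _ hc,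
          PySem.Set.add_of_mem ((PySem.Dict.contains_iff_mem_keys _ _).mp hc)]
      · rw [PySem.Dict.keys_insert_of_not_contains _ _ (Bool.not_eq_true _ ▸ hc),
          PySem.Set.add_of_not_mem (fun hm => hc ((PySem.Dict.contains_iff_mem_keys _ _).mpr hm))]
    have hkeys : (stepA dflt d p).keys = PySem.Set.add d.keys p.1 := by
      unfold stepA
      rw [PySem.Dict.keys_insert_of_contains _ _
        ((PySem.Dict.contains_iff_mem_keys _ _).mpr (h1 ▸ (PySem.Set.mem_add _ _ _).mpr (Or.inl hdflt))), h1]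
    rw [List.foldl_cons, List.map_cons, PySem.Set.update_cons,
      ih (stepA dflt d p) (hkeys ▸ (PySem.Set.mem_add _ _ _).mpr (Or.inl hdflt)), hkeys]

-- B's initialisation: all values are the empty set
theorem B0_getD (bs : List (String × List Int)) :
    ∀ (d : PySem.Dict String (PySem.Set (List Int))),
    (∀ k, d.getD k [] = ([] : PySem.Set (List Int))) →
    ∀ k, (bs.foldl (fun d p => d.insert p.1 PySem.Set.empty) d).getD k [] = [] := by
  induction bs with
  | nil => intro d h k; exact h k
  | cons p rest ih =>
    intro d h k
    rw [List.foldl_cons]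
    refine ih _ (fun k' => ?_) k
    rw [PySem.Dict.getD_insert]
    by_cases hk : k' = p.1
    · rw [if_pos hk]; rfl
    · rw [if_neg hk]; exact h k'

-- B's initialisation: items list
theorem B0_items (bs : List (String × List Int)) (dflt : String)
    (hd : dflt ∉ bs.map Prod.fst) (hn : (bs.map Prod.fst).Nodup) :
    (bs.foldl (fun d p => d.insert p.1 PySem.Set.empty)
        (PySem.Dict.empty.insert dflt PySem.Set.empty)).items
      = (dflt, ([] : PySem.Set (List Int))) :: bs.map (fun p => (p.1, [])) := by
  rw [PySem.Dict.items_foldl_insert_fresh bs Prod.fst (fun _ => PySem.Set.empty) _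
    (fun a ha => by
      rw [PySem.Dict.contains_insert]
      have h1 : (a.1 == dflt) = false :=
        beq_eq_false_iff_ne.mpr (fun e => hd (e ▸ List.mem_map_of_mem ha))
      rw [h1, PySem.Dict.contains_empty]
      rfl)
    hn]
  rw [PySem.Dict.items_insert_of_not_contains _ _ (PySem.Dict.contains_empty _)]
  rfl

-- a Set.update by elements already present is the identity
theorem set_update_self (s : PySem.Set String) (xs : List String) (h : ∀ x ∈ xs, x ∈ s) :
    PySem.Set.update s xs = s := by
  rw [PySem.Set.update_eq_append_filter]
  rw [List.filter_eq_nil_iff.mpr (fun y hy => by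
    have hys : y ∈ s := h y ((PySem.Set.mem_ofList _ _).mp hy)
    simp [hys]), List.append_nil]

-- the two ports produce the same items list
theorem organize_edges_main (edges : List (List Int)) (bs : List (String × List Int)) (dflt : String)
    (hd : dflt ∉ bs.map Prod.fst) (hn : (bs.map Prod.fst).Nodup) :
    (bs.foldl (stepA dflt) (PySem.Dict.empty.insert dflt (PySem.Set.ofList edges))).items
      = (edges.foldl (fun d t => d.modify (firstTarget bs t dflt) [] (fun s => PySem.Set.add s t))
          (bs.foldl (fun d p => d.insert p.1 PySem.Set.empty)
            (PySem.Dict.empty.insert dflt PySem.Set.empty))).items := by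
  set d0A : PySem.Dict String (PySem.Set (List Int)) :=
    PySem.Dict.empty.insert dflt (PySem.Set.ofList edges) with hd0A
  set d0B : PySem.Dict String (PySem.Set (List Int)) :=
    bs.foldl (fun d p => d.insert p.1 PySem.Set.empty)
      (PySem.Dict.empty.insert dflt PySem.Set.empty) with hd0B
  have hk0A : d0A.keys = [dflt] := by
    rw [hd0A, PySem.Dict.keys_insert_of_not_contains _ _ (PySem.Dict.contains_empty _)]
    rfl
  have hkA : (bs.foldl (stepA dflt) d0A).keys = dflt :: bs.map Prod.fst := by
    rw [A_fold_keys bs dflt d0A (by rw [hk0A]; exact List.mem_singleton.mpr rfl), hk0A,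
      PySem.Set.update_eq_append_of_disjoint _ _ hn
        (fun x hx hmem => hd (by rwa [List.mem_singleton.mp hmem] at hx))]
    rfl
  have hkB : (edges.foldl (fun d t => d.modify (firstTarget bs t dflt) [] (fun s => PySem.Set.add s t)) d0B).keys
      = dflt :: bs.map Prod.fst := by
    rw [PySem.Dict.keys_foldl_modify_key]
    have hk0B : d0B.keys = dflt :: bs.map Prod.fst := by
      show d0B.items.map Prod.fst = _
      rw [hd0B, B0_items bs dflt hd hn, List.map_cons, List.map_map]
      rfl
    rw [hk0B]
    refine set_update_self _ _ (fun x hx => ?_)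
    obtain ⟨t, _, rfl⟩ := List.mem_map.mp hx
    rcases firstTarget_mem bs t dflt with h | h
    · rw [h]; exact List.mem_cons_self
    · exact List.mem_cons_of_mem _ h
  have hga : d0A.getD dflt [] = PySem.Set.ofList edges := by
    rw [hd0A, PySem.Dict.getD_insert_self]
  have hnk : (dflt :: bs.map Prod.fst).Nodup := List.nodup_cons.mpr ⟨hd, hn⟩
  have hvals : ∀ k ∈ dflt :: bs.map Prod.fst,
      (bs.foldl (stepA dflt) d0A).getD k []
        = (edges.foldl (fun d t => d.modify (firstTarget bs t dflt) [] (fun s => PySem.Set.add s t)) d0B).getD k [] := by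
    intro k hk
    rw [A_fold_getD bs dflt d0A hd hn (by rw [hga]; exact PySem.Set.nodup_ofList _) k,
      if_pos (by
        rcases List.mem_cons.mp hk with h | h
        · exact Or.inl h
        · exact Or.inr h), hga]
    rw [B_fold_getD bs dflt edges d0B k,
      B0_getD bs (PySem.Dict.empty.insert dflt PySem.Set.empty)
        (fun k' => by
          rw [PySem.Dict.getD_insert]
          by_cases hk' : k' = dflt
          · rw [if_pos hk']; rfl
          · rw [if_neg hk', PySem.Dict.getD_empty]) k]
    rw [← PySem.Set.ofList_eq_foldl, pv_dedup_filter]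
  rw [PySem.Dict.items_eq_map_keys _ (hkA ▸ hnk) ([] : PySem.Set (List Int)),
    PySem.Dict.items_eq_map_keys _ (hkB ▸ hnk) ([] : PySem.Set (List Int)), hkA, hkB]
  exact List.map_congr_left (fun k hk => by rw [hvals k hk])

-- ===== VERDICT (by name: the statement is the Claim_ definition above) =====
theorem organize_edges_spec : Claim_equal_organize_edges := by
  intro edges borders default_border _ hpre
  obtain ⟨hd, hn, -⟩ := hpre
  unfold Spec_organize_edges organize_edges organize_edges_alt
  cases borders with
  | none => exact organize_edges_main edges [] default_border (by simp) (by simp)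
  | some bs => exact organize_edges_main edges bs default_border hd hn
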